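-- pv_equiv track=rewrite | github.com/jiayizx/Therapy_Privacy_System_Study_1 | webapp/feedback_utils.py | get_survey_sample
-- ===== SOURCE A (Python) =====
-- from collections import defaultdict
--
-- def get_survey_sample(all_detections:dict, max_display:int = 10):
--     """
--     This function samples the survey questions for the user to provide feedback.
--     Sampling function is yet to be done. For now, it returns the first 10 detections which have been identified.
--     """
--
--     # If there are less than sample size, return all detections
--     if len(all_detections) <= max_display:
--         return all_detections
--
--     # Group the detections by category
--     categories = defaultdict(list)
--     for key, value in all_detections.items():
--         categories[value["category"]].append(key)
--
--     # Start with sampling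
--     samples, sampled_detections = 0, {}
--     while samples < max_display:
--         for category in sorted(categories):
--             if samples >= max_display:
--                 return sampled_detections
--                 # We can sample only if the category has more than one detection
--             if len(categories[category]):
--                 key = categories[category].pop(0)
--                 sampled_detections[key] = all_detections[key]
--                 samples += 1
--     return sampled_detections
-- ===== SOURCE B (Python) =====
-- def get_survey_sample(all_detections: dict, max_display: int = 10):
--     """Round-robin sample of detections across sorted categories, computed by
--     transposing precomputed per-category key lists instead of a pop-and-rescan loop."""
--     if len(all_detections) <= max_display:
--         return all_detections
--
--     categories = {}
--     for key, value in all_detections.items():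
--         categories.setdefault(value["category"], []).append(key)
--
--     lists = [categories[c] for c in sorted(categories)]
--     rounds = max((len(lst) for lst in lists), default=0)
--     order = [lst[i] for i in range(rounds) for lst in lists if i < len(lst)]
--     keys = order[:max(0, max_display)]
--     return {key: all_detections[key] for key in keys}
-- ===== Notes on version B (the rewrite author's own statement) =====
-- stated objective: alternative
-- what changed: A repeatedly re-sorts the category keys and pops one key per step inside a while-loop that mutates the category dict; B builds the sorted per-category key lists once, reads the round-robin order off their transpose (round i takes element i of each list), slices the first max(0, max_display) keys and builds the result dict in one comprehension.
import Mathlib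
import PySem

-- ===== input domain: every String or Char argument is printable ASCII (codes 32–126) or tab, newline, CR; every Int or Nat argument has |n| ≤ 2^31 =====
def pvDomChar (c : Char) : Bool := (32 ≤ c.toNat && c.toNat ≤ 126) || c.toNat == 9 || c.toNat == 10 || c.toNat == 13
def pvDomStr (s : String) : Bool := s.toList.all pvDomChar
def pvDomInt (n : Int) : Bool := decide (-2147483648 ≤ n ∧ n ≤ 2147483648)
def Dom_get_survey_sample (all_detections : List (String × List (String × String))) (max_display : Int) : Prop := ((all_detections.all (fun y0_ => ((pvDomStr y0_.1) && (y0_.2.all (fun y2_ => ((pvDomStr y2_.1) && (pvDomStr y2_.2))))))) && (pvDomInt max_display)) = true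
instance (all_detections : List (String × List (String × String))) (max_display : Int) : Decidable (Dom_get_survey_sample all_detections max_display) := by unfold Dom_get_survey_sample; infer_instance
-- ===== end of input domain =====

-- B changes the decomposition: instead of A's pop-one-key-per-step while-loop over the mutated
-- category dict, it builds the sorted per-category key lists once and reads the round-robin order
-- off their transpose (objective: alternative decomposition of the same cost).

abbrev pvDS := PySem.Dict String (List (String × String))
abbrev pvCD := PySem.Dict String (List String)

-- shared helper: value["category"] (inner dict lookup; Pre_ guarantees the key is present)
def pvCatOf (v : List (String × String)) : String := (PySem.Dict.ofList v).getD "category" ""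

-- ===== PORT A =====
-- the inner `for category in sorted(categories)` pass of A's while loop
def pvForA (d : pvDS) (md : Int) :
    List String → Int × pvDS × pvCD → pvDS ⊕ (Int × pvDS × pvCD)
  | [], st => .inr st
  | c :: rest, (samples, sampled, cats) =>
    if md ≤ samples then .inl sampled
    else
      match cats.getD c [] with
      | [] => pvForA d md rest (samples, sampled, cats)
      | k :: ks => pvForA d md rest (samples + 1, sampled.insert k (d.getD k []), cats.insert c ks)

-- the `while samples < max_display` loop of A (fuel = len(all_detections)+1, provably enough:
-- each full pass pops at least one key while the loop condition holds)
def pvWhileA (d : pvDS) (md : Int) : Nat → Int × pvDS × pvCD → pvDS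
  | 0, (_, sampled, _) => sampled
  | fuel + 1, (samples, sampled, cats) =>
    if samples < md then
      match pvForA d md (PySem.List.sorted cats.keys (fun c => c) false) (samples, sampled, cats) with
      | .inl res => res
      | .inr st => pvWhileA d md fuel st
    else sampled

def get_survey_sample (all_detections : List (String × List (String × String))) (max_display : Int) : List (String × List (String × String)) :=
  let d := PySem.Dict.ofList all_detections
  if (d.items.length : Int) ≤ max_display then d.items
  else
    let cats : pvCD := d.items.foldl (fun cs p => cs.modify (pvCatOf p.2) [] (fun l => l ++ [p.1])) PySem.Dict.empty
    (pvWhileA d max_display (d.items.length + 1) (0, PySem.Dict.empty, cats)).items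

-- ===== PORT B =====
def get_survey_sample_alt (all_detections : List (String × List (String × String))) (max_display : Int) : List (String × List (String × String)) :=
  let d := PySem.Dict.ofList all_detections
  if (d.items.length : Int) ≤ max_display then d.items
  else
    let cats : pvCD := d.items.foldl (fun cs p => cs.modify (pvCatOf p.2) [] (fun l => l ++ [p.1])) PySem.Dict.empty
    let lists := (PySem.List.sorted cats.keys (fun c => c) false).map (fun c => cats.getD c [])
    let rounds : Int := PySem.List.maxD (lists.map (fun l => (l.length : Int))) (fun x => x) 0
    let order := (PySem.List.pyRange 0 rounds 1).flatMap (fun i =>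
      lists.flatMap (fun lst => if i < (lst.length : Int) then [PySem.List.pyGetD lst i ""] else []))
    let keys := order.take (max 0 max_display).toNat
    (keys.foldl (fun sm k => sm.insert k (d.getD k [])) PySem.Dict.empty).items

-- ===== PRECONDITION & SPEC =====
-- Pre_ excludes exactly the inputs on which Python A raises KeyError: some value lacks the
-- "category" key while the guard len(all_detections) <= max_display does not fire.
def Pre_get_survey_sample (all_detections : List (String × List (String × String))) (max_display : Int) : Prop :=
  ((PySem.Dict.ofList all_detections).items.length : Int) ≤ max_display ∨
  ∀ p ∈ (PySem.Dict.ofList all_detections).items, (PySem.Dict.ofList p.2).contains "category" = true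
instance (all_detections : List (String × List (String × String))) (max_display : Int) : Decidable (Pre_get_survey_sample all_detections max_display) := by unfold Pre_get_survey_sample; infer_instance

def pvWitness_get_survey_sample : (List (String × List (String × String))) × Int :=
  ([("k1", [("category", "a")]), ("k2", [("category", "b")]), ("k3", [("category", "a")])], 2)

def Spec_get_survey_sample (all_detections : List (String × List (String × String))) (max_display : Int) (out : List (String × List (String × String))) : Prop := out = get_survey_sample_alt all_detections max_display
instance (all_detections : List (String × List (String × String))) (max_display : Int) (out : List (String × List (String × String))) : Decidable (Spec_get_survey_sample all_detections max_display out) := by unfold Spec_get_survey_sample; infer_instance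

-- ===== CLAIM (what is proved, stated in full; the proofs are below) =====
def Claim_equal_get_survey_sample : Prop := ∀ (all_detections : List (String × List (String × String))) (max_display : Int), Dom_get_survey_sample all_detections max_display → Pre_get_survey_sample all_detections max_display → Spec_get_survey_sample all_detections max_display (get_survey_sample all_detections max_display)

-- ===== LEMMAS AND PROOFS =====

-- proof-side helpers: pvIns = the result-dict fold shared by both ports; pvRRN = the round-robin
-- key order read off the transpose of the per-category lists
def pvIns (d : pvDS) (sm : pvDS) (ks : List String) : pvDS :=
  ks.foldl (fun sm k => sm.insert k (d.getD k [])) sm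
def pvHeads (ls : List (List String)) : List String := ls.filterMap List.head?
def pvRounds (ls : List (List String)) : Nat := (ls.map List.length).foldl max 0
def pvRound (ls : List (List String)) (i : Nat) : List String := ls.filterMap (fun l => l[i]?)
def pvRRN (ls : List (List String)) : List String := (List.range (pvRounds ls)).flatMap (pvRound ls)

lemma pv_foldl_max_le (ns : List Nat) (a b : Nat) (ha : a ≤ b) (h : ∀ y ∈ ns, y ≤ b) :
    ns.foldl max a ≤ b := by
  induction ns generalizing a with
  | nil => exact ha
  | cons n t ih =>
    exact ih (max a n) (by have := h n (by simp); omega) (fun y hy => h y (by simp [hy]))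

lemma pv_len_le_rounds (ls : List (List String)) (l : List String) (hl : l ∈ ls) :
    l.length ≤ pvRounds ls :=
  (PySem.List.le_foldl_max (ls.map List.length) 0).2 _ (List.mem_map_of_mem hl)

lemma pv_round_empty (ls : List (List String)) (i : Nat) (h : pvRounds ls ≤ i) :
    pvRound ls i = [] := by
  refine List.filterMap_eq_nil_iff.2 (fun l hl => ?_)
  have := pv_len_le_rounds ls l hl
  exact List.getElem?_eq_none (by omega)

lemma pv_g_stable (ls : List (List String)) :
    ∀ N, pvRounds ls ≤ N → (List.range N).flatMap (pvRound ls) = pvRRN ls := by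
  intro N
  induction N with
  | zero => intro h; unfold pvRRN; rw [Nat.le_zero.1 h]
  | succ N ih =>
    intro h
    by_cases h' : pvRounds ls ≤ N
    · rw [List.range_succ, List.flatMap_append, ih h']
      simp [pv_round_empty ls N h']
    · have h2 : pvRounds ls = N + 1 := by omega
      rw [← h2]; rfl

lemma pv_heads_eq_round0 (ls : List (List String)) : pvHeads ls = pvRound ls 0 := by
  unfold pvHeads pvRound
  exact List.filterMap_congr (fun l _ => List.head?_eq_getElem?)

lemma pv_rounds_drop_le (ls : List (List String)) (r : Nat) (h : pvRounds ls ≤ r + 1) :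
    pvRounds (ls.map (List.drop 1)) ≤ r := by
  apply pv_foldl_max_le _ _ _ (by omega)
  intro y hy
  rcases List.mem_map.1 hy with ⟨l', hl', rfl⟩
  rcases List.mem_map.1 hl' with ⟨l, hl, rfl⟩
  have := pv_len_le_rounds ls l hl
  simp only [List.length_drop]
  omega

lemma pv_shift (ls : List (List String)) :
    pvRRN ls = pvHeads ls ++ pvRRN (ls.map (List.drop 1)) := by
  rcases hR : pvRounds ls with _ | r
  · have hempty : ∀ l ∈ ls, l = [] := by
      intro l hl
      have := pv_len_le_rounds ls l hl
      rw [hR] at this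
      exact List.length_eq_zero_iff.1 (by omega)
    have h1 : pvRRN ls = [] := by unfold pvRRN; rw [hR]; rfl
    have h2 : pvHeads ls = [] := by
      refine List.filterMap_eq_nil_iff.2 (fun l hl => ?_)
      rw [hempty l hl]; rfl
    have h3 : pvRRN (ls.map (List.drop 1)) = [] := by
      unfold pvRRN
      rw [Nat.le_zero.1 (by simpa [hR] using pv_rounds_drop_le ls 0 (by omega) : pvRounds (ls.map (List.drop 1)) ≤ 0)]
      rfl
    rw [h1, h2, h3]; rfl
  · unfold pvRRN
    rw [hR, List.range_succ_eq_map, List.flatMap_cons, List.flatMap_map]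
    rw [← pv_heads_eq_round0]
    congr 1
    have hptw : ∀ i : Nat, pvRound ls (Nat.succ i) = pvRound (ls.map (List.drop 1)) i := by
      intro i
      unfold pvRound
      rw [List.filterMap_map]
      refine List.filterMap_congr (fun l _ => ?_)
      show l[i+1]? = (l.drop 1)[i]?
      rw [List.getElem?_drop, Nat.add_comm]
    calc (List.range r).flatMap (fun i => pvRound ls (Nat.succ i))
        = (List.range r).flatMap (fun i => pvRound (ls.map (List.drop 1)) i) := by
          exact List.flatMap_congr (fun i _ => hptw i)
      _ = pvRRN (ls.map (List.drop 1)) := pv_g_stable _ r (pv_rounds_drop_le ls r (by omega))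

lemma pv_lensum (ls : List (List String)) :
    ((ls.map (List.drop 1)).map List.length).sum + (pvHeads ls).length = (ls.map List.length).sum := by
  induction ls with
  | nil => simp [pvHeads]
  | cons l t ih =>
    cases l with
    | nil => simpa [pvHeads] using ih
    | cons x xs =>
      simp only [List.map_cons, List.sum_cons, pvHeads, List.filterMap_cons] at *
      simp only [List.head?] at *
      simp only [List.length_cons, List.length_drop] at *
      omega

lemma pv_heads_nil_sum (ls : List (List String)) (h : pvHeads ls = []) :
    (ls.map List.length).sum = 0 := by
  have h' := List.filterMap_eq_nil_iff.1 h
  refine List.sum_eq_zero (fun x hx => ?_)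
  rcases List.mem_map.1 hx with ⟨l, hl, rfl⟩
  have := h' l hl
  cases l with
  | nil => simp
  | cons a t => simp [List.head?] at this

lemma pv_keysum (xs : List (String × String)) :
    ∀ ks : List String, ks.Nodup → (∀ x ∈ xs, x.1 ∈ ks) →
      (ks.map (fun c => (xs.filter (fun q => q.1 == c)).length)).sum = xs.length := by
  induction xs with
  | nil => intro ks _ _; simp
  | cons x t ih =>
    intro ks hnd hcov
    have hmem : x.1 ∈ ks := hcov x (by simp)
    have hrw : ks.map (fun c => (((x :: t).filter (fun q => q.1 == c)).length))
        = ks.map (fun c => (if x.1 == c then 1 else 0) + (t.filter (fun q => q.1 == c)).length) := by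
      refine List.map_congr_left (fun c _ => ?_)
      rw [List.filter_cons]
      by_cases h : x.1 == c
      · rw [if_pos h, if_pos h]; simp only [List.length_cons]; omega
      · rw [if_neg h, if_neg (by exact h)]; omega
    rw [hrw]
    have hsplit : ∀ (f g : String → Nat) (ls : List String),
        (ls.map (fun c => f c + g c)).sum = (ls.map f).sum + (ls.map g).sum := by
      intro f g ls
      induction ls with
      | nil => rfl
      | cons c cs ihk => simp only [List.map_cons, List.sum_cons, ihk]; omega
    rw [hsplit, ih ks hnd (fun y hy => hcov y (by simp [hy]))]
    have hone : (ks.map (fun c => if x.1 == c then 1 else 0)).sum = 1 := by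
      have h2 : ∀ ls : List String, (ls.map (fun c => if x.1 == c then 1 else 0)).sum = ls.count x.1 := by
        intro ls
        induction ls with
        | nil => rfl
        | cons c cs ihk =>
          rw [List.map_cons, List.sum_cons, ihk, List.count_cons]
          by_cases h : x.1 = c
          · rw [if_pos (by exact beq_iff_eq.2 h), if_pos (by exact beq_iff_eq.2 h.symm)]
            omega
          · rw [if_neg (by simp [h]), if_neg (by simp [Ne.symm h])]
            omega
      rw [h2, List.count_eq_one_of_mem hnd hmem]
    rw [hone]
    simp only [List.length_cons]
    omega

lemma pv_maxD_aux (ns : List Nat) (a : Nat) :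
    List.foldl (fun acc x => match acc with
      | none => some x
      | some m => if m < x then some x else some m) (some ((a : Nat) : Int)) (ns.map (fun n : Nat => (n : Int)))
    = some ((ns.foldl max a : Nat) : Int) := by
  induction ns generalizing a with
  | nil => rfl
  | cons n t ih =>
    rw [show ((n :: t).map (fun n : Nat => (n : Int))) = (n : Int) :: t.map (fun n : Nat => (n : Int)) from rfl,
        List.foldl_cons]
    rw [show (match some ((a:Nat):Int) with
      | none => some ((n:Nat):Int)
      | some m => if m < ((n:Nat):Int) then some ((n:Nat):Int) else some m)
        = some (((max a n : Nat) : Int)) by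
      show (if ((a:Nat):Int) < ((n:Nat):Int) then some ((n:Nat):Int) else some ((a:Nat):Int)) = _
      by_cases h : a < n
      · rw [if_pos (by exact_mod_cast h)]; congr 1; omega
      · rw [if_neg (by exact_mod_cast h)]; congr 1; omega]
    rw [ih (max a n)]
    rfl

lemma pv_rounds_int (ls : List (List String)) :
    PySem.List.maxD (ls.map (fun l => (l.length : Int))) (fun x => x) 0 = ((pvRounds ls : Nat) : Int) := by
  have key : ∀ (xs : List Int), PySem.List.max? xs (fun x => x) =
      List.foldl (fun acc x => match acc with
        | none => some x
        | some m => if m < x then some x else some m) none xs := by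
    intro xs
    unfold PySem.List.max?
    congr 1
    funext acc x
    cases acc <;> simp
  cases ls with
  | nil => rfl
  | cons l t =>
    show (PySem.List.max? ((l :: t).map (fun l => (l.length : Int))) (fun x => x)).getD 0 = _
    rw [key]
    rw [show ((l :: t).map (fun l => (l.length : Int))) = ((l.length : Nat) : Int) :: t.map (fun l => (l.length : Int)) from rfl,
        List.foldl_cons]
    rw [show t.map (fun l => (l.length : Int)) = List.map (fun n : Nat => (n : Int)) (t.map List.length) by
      rw [List.map_map]; rfl]
    rw [show (match (none : Option Int) with
      | none => some ((l.length : Nat) : Int)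
      | some m => if m < ((l.length:Nat):Int) then some ((l.length:Nat):Int) else some m)
      = some ((l.length : Nat) : Int) from rfl]
    rw [pv_maxD_aux (t.map List.length) l.length]
    show ((((t.map List.length).foldl max l.length : Nat)) : Int) = _
    unfold pvRounds
    rw [List.map_cons, List.foldl_cons,
       show max 0 l.length = l.length by omega]

lemma pv_inner_eq (k : Nat) (lists : List (List String)) :
    lists.flatMap (fun lst => if (k : Int) < (lst.length : Int) then [PySem.List.pyGetD lst (k : Int) ""] else [])
      = pvRound lists k := by
  induction lists with
  | nil => rfl
  | cons l t ih =>
    unfold pvRound at *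
    rw [List.flatMap_cons, List.filterMap_cons, ih]
    by_cases h : k < l.length
    · rw [if_pos (by exact_mod_cast h)]
      rw [List.getElem?_eq_getElem h]
      rw [show PySem.List.pyGetD l (k : Int) "" = l[k] by
        rw [PySem.List.pyGetD_natCast, List.getD_eq_getElem?_getD, List.getElem?_eq_getElem h]; rfl]
      rfl
    · rw [if_neg (by exact_mod_cast h), List.getElem?_eq_none (by omega)]
      rfl

lemma pv_order_eq (lists : List (List String)) :
    (PySem.List.pyRange 0 (PySem.List.maxD (lists.map (fun l => (l.length : Int))) (fun x => x) 0) 1).flatMap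
      (fun i => lists.flatMap (fun lst => if i < (lst.length : Int) then [PySem.List.pyGetD lst i ""] else []))
      = pvRRN lists := by
  rw [pv_rounds_int, PySem.List.pyRange_zero_natCast, List.flatMap_map]
  unfold pvRRN
  exact List.flatMap_congr (fun i _ => pv_inner_eq i lists)

lemma pvIns_append (d : pvDS) (sm : pvDS) (a b : List String) :
    pvIns d sm (a ++ b) = pvIns d (pvIns d sm a) b := by
  simp [pvIns, List.foldl_append]

lemma pv_contains_of_getD_cons (cats : pvCD) (c : String) (k : String) (ks : List String)
    (h : cats.getD c [] = k :: ks) : cats.contains c = true := by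
  cases hcc : cats.contains c
  · rw [PySem.Dict.getD_of_not_contains cats [] hcc] at h; cases h
  · rfl

lemma pv_passA1 (d : pvDS) (md : Int) :
    ∀ (cs : List String), cs.Nodup → ∀ (s : Int) (sm : pvDS) (cats : pvCD),
      s + ((cs.filterMap fun c => (cats.getD c []).head?).length : Int) ≤ md →
      (pvForA d md cs (s, sm, cats)
          = Sum.inl (pvIns d sm (cs.filterMap fun c => (cats.getD c []).head?)) ∧
        s + ((cs.filterMap fun c => (cats.getD c []).head?).length : Int) = md) ∨
      (∃ cats' : pvCD, pvForA d md cs (s, sm, cats)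
          = Sum.inr (s + ((cs.filterMap fun c => (cats.getD c []).head?).length : Int),
                     pvIns d sm (cs.filterMap fun c => (cats.getD c []).head?), cats') ∧
        cats'.keys = cats.keys ∧
        ∀ c, cats'.getD c [] = if c ∈ cs then (cats.getD c []).drop 1 else cats.getD c []) := by
  intro cs
  induction cs with
  | nil =>
    intro _ s sm cats _
    right
    refine ⟨cats, ?_, rfl, fun c => by simp⟩
    simp [pvForA, pvIns]
  | cons c rest ih =>
    intro hnd s sm cats hle
    have hndr : rest.Nodup := (List.nodup_cons.1 hnd).2
    have hcr : c ∉ rest := (List.nodup_cons.1 hnd).1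
    by_cases hms : md ≤ s
    · -- the pass returns immediately; the whole head list must be empty
      have hlen0 : ((c :: rest).filterMap fun c => (cats.getD c []).head?).length = 0 := by omega
      have hnil : ((c :: rest).filterMap fun c => (cats.getD c []).head?) = [] :=
        List.length_eq_zero_iff.1 hlen0
      left
      constructor
      · show (if md ≤ s then Sum.inl sm else _) = _
        rw [if_pos hms, hnil]
        rfl
      · omega
    · have hms' : ¬ md ≤ s := hms
      rcases hget : cats.getD c [] with _ | ⟨k, ks⟩
      · -- empty category: skip
        have hfm : ((c :: rest).filterMap fun c => (cats.getD c []).head?)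
            = rest.filterMap fun c => (cats.getD c []).head? := by
          rw [List.filterMap_cons, hget]; rfl
        have hstep : pvForA d md (c :: rest) (s, sm, cats) = pvForA d md rest (s, sm, cats) := by
          show (if md ≤ s then _ else _) = _
          rw [if_neg hms']
          rw [show (match cats.getD c [] with
            | [] => pvForA d md rest (s, sm, cats)
            | k :: ks => pvForA d md rest (s + 1, sm.insert k (d.getD k []), cats.insert c ks))
            = pvForA d md rest (s, sm, cats) by rw [hget]]
        rw [hstep, hfm]
        rcases ih hndr s sm cats (by rw [hfm] at hle; exact hle) with ⟨h1, h2⟩ | ⟨cats', h1, hk, hc⟩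
        · left; exact ⟨h1, h2⟩
        · right
          refine ⟨cats', h1, hk, fun c' => ?_⟩
          rw [hc c']
          by_cases hmemr : c' ∈ rest
          · rw [if_pos hmemr, if_pos (by simp [hmemr])]
          · by_cases hceq : c' = c
            · subst hceq
              rw [if_neg hmemr, if_pos (by simp), hget]
              rfl
            · rw [if_neg hmemr, if_neg (by simp [hmemr, hceq])]
      · -- pop the head k
        have hfm : ((c :: rest).filterMap fun c => (cats.getD c []).head?)
            = k :: (rest.filterMap fun c => (cats.getD c []).head?) := by
          rw [List.filterMap_cons, hget]; rfl
        have hcong : (rest.filterMap fun c' => ((cats.insert c ks).getD c' []).head?)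
            = rest.filterMap fun c' => (cats.getD c' []).head? := by
          refine List.filterMap_congr (fun c' hc' => ?_)
          rw [PySem.Dict.getD_insert_of_ne cats ks [] (fun he => hcr (by rw [← he]; exact hc'))]
        have hstep : pvForA d md (c :: rest) (s, sm, cats)
            = pvForA d md rest (s + 1, sm.insert k (d.getD k []), cats.insert c ks) := by
          show (if md ≤ s then _ else _) = _
          rw [if_neg hms']
          rw [show (match cats.getD c [] with
            | [] => pvForA d md rest (s, sm, cats)
            | k :: ks => pvForA d md rest (s + 1, sm.insert k (d.getD k []), cats.insert c ks))
            = pvForA d md rest (s + 1, sm.insert k (d.getD k []), cats.insert c ks) by rw [hget]]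
        have hle' : (s + 1) + ((rest.filterMap fun c' => ((cats.insert c ks).getD c' []).head?).length : Int) ≤ md := by
          rw [hcong]
          rw [hfm] at hle
          simp only [List.length_cons] at hle
          push_cast at hle ⊢
          omega
        rw [hstep]
        rcases ih hndr (s + 1) (sm.insert k (d.getD k [])) (cats.insert c ks) hle'
          with ⟨h1, h2⟩ | ⟨cats', h1, hk2, hc2⟩
        · left
          rw [hcong] at h1 h2
          constructor
          · rw [h1, hfm]; rfl
          · rw [hfm]; simp only [List.length_cons]; push_cast; omega
        · right
          rw [hcong] at h1
          refine ⟨cats', ?_, ?_, fun c' => ?_⟩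
          · rw [h1, hfm]
            simp only [List.length_cons]
            congr 2
            push_cast; omega
          · rw [hk2, PySem.Dict.keys_insert_of_contains cats ks (pv_contains_of_getD_cons cats c k ks hget)]
          · rw [hc2 c']
            by_cases hmemr : c' ∈ rest
            · rw [if_pos hmemr, if_pos (by simp [hmemr]),
                  PySem.Dict.getD_insert_of_ne cats ks [] (fun he => hcr (by rw [← he]; exact hmemr))]
            · by_cases hceq : c' = c
              · subst hceq
                rw [if_neg hmemr, if_pos (by simp), PySem.Dict.getD_insert_self, hget]
                rfl
              · rw [if_neg hmemr, if_neg (by simp [hmemr, hceq]),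
                    PySem.Dict.getD_insert_of_ne cats ks [] hceq]

lemma pv_passA2 (d : pvDS) (md : Int) :
    ∀ (cs : List String), ∀ (s : Int) (sm : pvDS) (cats : pvCD), cs.Nodup →
      s ≤ md →
      md < s + ((cs.filterMap fun c => (cats.getD c []).head?).length : Int) →
      pvForA d md cs (s, sm, cats)
        = Sum.inl (pvIns d sm ((cs.filterMap fun c => (cats.getD c []).head?).take (md - s).toNat)) := by
  intro cs
  induction cs with
  | nil =>
    intro s sm cats _ h1 h2
    simp only [List.filterMap_nil, List.length_nil] at h2
    omega
  | cons c rest ih =>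
    intro s sm cats hnd hsle hlt
    have hndr : rest.Nodup := (List.nodup_cons.1 hnd).2
    have hcr : c ∉ rest := (List.nodup_cons.1 hnd).1
    by_cases hms : md ≤ s
    · have hs : s = md := by omega
      have ht0 : (md - s).toNat = 0 := by omega
      show (if md ≤ s then Sum.inl sm else _) = _
      rw [if_pos hms, ht0]
      rfl
    · rcases hget : cats.getD c [] with _ | ⟨k, ks⟩
      · have hfm : ((c :: rest).filterMap fun c => (cats.getD c []).head?)
            = rest.filterMap fun c => (cats.getD c []).head? := by
          rw [List.filterMap_cons, hget]; rfl
        have hstep : pvForA d md (c :: rest) (s, sm, cats) = pvForA d md rest (s, sm, cats) := by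
          show (if md ≤ s then _ else _) = _
          rw [if_neg hms]
          rw [show (match cats.getD c [] with
            | [] => pvForA d md rest (s, sm, cats)
            | k :: ks => pvForA d md rest (s + 1, sm.insert k (d.getD k []), cats.insert c ks))
            = pvForA d md rest (s, sm, cats) by rw [hget]]
        rw [hstep, hfm, ih s sm cats hndr hsle (by rw [hfm] at hlt; exact hlt)]
      · have hfm : ((c :: rest).filterMap fun c => (cats.getD c []).head?)
            = k :: (rest.filterMap fun c => (cats.getD c []).head?) := by
          rw [List.filterMap_cons, hget]; rfl
        have hcong : (rest.filterMap fun c' => ((cats.insert c ks).getD c' []).head?)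
            = rest.filterMap fun c' => (cats.getD c' []).head? := by
          refine List.filterMap_congr (fun c' hc' => ?_)
          rw [PySem.Dict.getD_insert_of_ne cats ks [] (fun he => hcr (by rw [← he]; exact hc'))]
        have hstep : pvForA d md (c :: rest) (s, sm, cats)
            = pvForA d md rest (s + 1, sm.insert k (d.getD k []), cats.insert c ks) := by
          show (if md ≤ s then _ else _) = _
          rw [if_neg hms]
          rw [show (match cats.getD c [] with
            | [] => pvForA d md rest (s, sm, cats)
            | k :: ks => pvForA d md rest (s + 1, sm.insert k (d.getD k []), cats.insert c ks))
            = pvForA d md rest (s + 1, sm.insert k (d.getD k []), cats.insert c ks) by rw [hget]]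
        have hlt' : md < (s + 1) + ((rest.filterMap fun c' => ((cats.insert c ks).getD c' []).head?).length : Int) := by
          rw [hcong]
          rw [hfm] at hlt
          simp only [List.length_cons] at hlt
          push_cast at hlt ⊢
          omega
        rw [hstep, ih (s + 1) (sm.insert k (d.getD k [])) (cats.insert c ks) hndr (by omega) hlt']
        rw [hcong, hfm]
        rw [show (md - s).toNat = ((md - (s + 1)).toNat) + 1 by omega]
        rw [List.take_succ_cons]
        rfl

lemma pv_whileA (d : pvDS) (md : Int) :
    ∀ (fuel : Nat) (s : Int) (sm : pvDS) (cats : pvCD), cats.keys.Nodup →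
      md - s ≤ ((((PySem.List.sorted cats.keys (fun c => c) false).map fun c => cats.getD c []).map List.length).sum : Int) →
      (md - s).toNat < fuel →
      pvWhileA d md fuel (s, sm, cats)
        = pvIns d sm ((pvRRN ((PySem.List.sorted cats.keys (fun c => c) false).map fun c => cats.getD c [])).take (md - s).toNat) := by
  intro fuel
  induction fuel with
  | zero => intro s sm cats _ _ h; omega
  | succ f ih =>
    intro s sm cats hk hsum hfuel
    by_cases hlt : s < md
    · show (if s < md then _ else sm) = _
      rw [if_pos hlt]
      have hscnd : (PySem.List.sorted cats.keys (fun c => c) false).Nodup :=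
        ((PySem.List.sorted_perm cats.keys (fun c => c) false).nodup_iff).2 hk
      have hHfm : ((PySem.List.sorted cats.keys (fun c => c) false).filterMap fun c => (cats.getD c []).head?)
          = pvHeads ((PySem.List.sorted cats.keys (fun c => c) false).map fun c => cats.getD c []) := by
        unfold pvHeads
        rw [List.filterMap_map]
        rfl
      have hHlen := congrArg List.length hHfm
      by_cases hover : md < s + (((PySem.List.sorted cats.keys (fun c => c) false).filterMap fun c => (cats.getD c []).head?).length : Int)
      · rw [pv_passA2 d md _ s sm cats hscnd (by omega) hover]
        show pvIns d sm (((PySem.List.sorted cats.keys (fun c => c) false).filterMap fun c => (cats.getD c []).head?).take (md - s).toNat) = _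
        rw [hHfm, pv_shift, List.take_append_of_le_length (by omega)]
      · rcases pv_passA1 d md _ hscnd s sm cats (by omega) with ⟨h1, h2⟩ | ⟨cats', h1, hkeq, hchar⟩
        · rw [h1]
          show pvIns d sm ((PySem.List.sorted cats.keys (fun c => c) false).filterMap fun c => (cats.getD c []).head?) = _
          rw [hHfm, pv_shift, show (md - s).toNat = (pvHeads ((PySem.List.sorted cats.keys (fun c => c) false).map fun c => cats.getD c [])).length by omega]
          rw [List.take_append_of_le_length (by omega), List.take_of_length_le (by omega)]
        · rw [h1]
          show pvWhileA d md f _ = _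
          have hk' : cats'.keys.Nodup := by rw [hkeq]; exact hk
          have hmap : ((PySem.List.sorted cats'.keys (fun c => c) false).map fun c => cats'.getD c [])
              = ((PySem.List.sorted cats.keys (fun c => c) false).map fun c => cats.getD c []).map (List.drop 1) := by
            rw [hkeq, List.map_map]
            exact List.map_congr_left (fun c hc => by rw [hchar c, if_pos hc]; rfl)
          have hHne : 1 ≤ (pvHeads ((PySem.List.sorted cats.keys (fun c => c) false).map fun c => cats.getD c [])).length := by
            rcases List.eq_nil_or_concat (pvHeads ((PySem.List.sorted cats.keys (fun c => c) false).map fun c => cats.getD c [])) with hH | ⟨_, _, hH⟩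
            · exfalso
              have h0 := pv_heads_nil_sum _ hH
              omega
            · rw [hH]; simp
          have hlensum := pv_lensum ((PySem.List.sorted cats.keys (fun c => c) false).map fun c => cats.getD c [])
          rw [ih _ _ cats' hk' (by rw [hmap]; omega) (by rw [hHlen] at hover ⊢; omega)]
          rw [hmap, hHfm]
          rw [pv_shift ((PySem.List.sorted cats.keys (fun c => c) false).map fun c => cats.getD c [])]
          rw [List.take_append,
              List.take_of_length_le (l := pvHeads ((PySem.List.sorted cats.keys (fun c => c) false).map fun c => cats.getD c [])) (by omega),
              ← pvIns_append]
          congr 2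
          congr 1
          rw [hHlen] at hover
          omega
    · show (if s < md then _ else sm) = _
      rw [if_neg hlt, show (md - s).toNat = 0 by omega]
      rfl

lemma pv_ports_eq (ad : List (String × List (String × String))) (md : Int) :
    get_survey_sample ad md = get_survey_sample_alt ad md := by
  by_cases h : ((PySem.Dict.ofList ad).items.length : Int) ≤ md
  · show (if ((PySem.Dict.ofList ad).items.length : Int) ≤ md then (PySem.Dict.ofList ad).items else _)
        = (if ((PySem.Dict.ofList ad).items.length : Int) ≤ md then (PySem.Dict.ofList ad).items else _)
    rw [if_pos h, if_pos h]
  · have hlen : md < ((PySem.Dict.ofList ad).items.length : Int) := by omega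
    simp only [get_survey_sample, get_survey_sample_alt, if_neg h]
    set d := PySem.Dict.ofList ad with hd
    set L := d.items with hL
    set cats : pvCD := L.foldl (fun cs p => cs.modify (pvCatOf p.2) [] (fun l => l ++ [p.1])) PySem.Dict.empty with hcats
    set L' := L.map (fun p => (pvCatOf p.2, p.1)) with hL'
    have hfold : cats = L'.foldl (fun dd q => dd.modify q.1 [] (fun l => l ++ [q.2])) PySem.Dict.empty := by
      rw [hcats, hL', List.foldl_map]
    have hchar : ∀ c, cats.getD c [] = (L'.filter (fun q => q.1 == c)).map (fun q => q.2) := by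
      intro c
      rw [hfold, PySem.Dict.getD_foldl_modify_append L' PySem.Dict.empty c, PySem.Dict.getD_empty]
      rfl
    have hkeys : cats.keys = PySem.Set.ofList (L.map (fun p => pvCatOf p.2)) := by
      rw [hcats, PySem.Dict.keys_foldl_modify_key L (fun p => pvCatOf p.2) [] (fun _ p l => l ++ [p.1]) PySem.Dict.empty,
          PySem.Dict.keys_empty, PySem.Set.update_nil_left]
    have hk : cats.keys.Nodup := by
      rw [hcats]
      exact PySem.Dict.nodup_keys_foldl_modify_key L (fun p => pvCatOf p.2) [] (fun _ p l => l ++ [p.1]) PySem.Dict.empty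
        (by rw [PySem.Dict.keys_empty]; exact List.nodup_nil)
    have hsum : ((((PySem.List.sorted cats.keys (fun c => c) false).map fun c => cats.getD c []).map List.length).sum : Nat) = L.length := by
      rw [List.map_map]
      have hperm : ((PySem.List.sorted cats.keys (fun c => c) false).map (List.length ∘ fun c => cats.getD c [])).Perm
          (cats.keys.map (List.length ∘ fun c => cats.getD c [])) :=
        (PySem.List.sorted_perm cats.keys (fun c => c) false).map _
      rw [hperm.sum_eq]
      rw [List.map_congr_left (l := cats.keys) (f := List.length ∘ fun c => cats.getD c [])
        (g := fun c => (L'.filter (fun q => q.1 == c)).length)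
        (fun c _ => by show (cats.getD c []).length = _; rw [hchar c, List.length_map])]
      rw [pv_keysum L' cats.keys hk (fun x hx => ?_), hL', List.length_map]
      rw [hkeys]
      have : x.1 ∈ L'.map (fun q => q.1) := List.mem_map_of_mem hx
      rw [hL'] at this
      rw [List.map_map] at this
      exact (PySem.Set.mem_ofList _ _).2 (by simpa using this)
    show (pvWhileA d md (L.length + 1) (0, PySem.Dict.empty, cats)).items = _
    rw [pv_whileA d md (L.length + 1) 0 PySem.Dict.empty cats hk
        (by rw [show md - 0 = md by ring]; omega)
        (by omega)]
    show _ = ((((PySem.List.pyRange 0 (PySem.List.maxD (((PySem.List.sorted cats.keys (fun c => c) false).map (fun c => cats.getD c [])).map (fun l => (l.length : Int))) (fun x => x) 0) 1).flatMap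
      (fun i => ((PySem.List.sorted cats.keys (fun c => c) false).map (fun c => cats.getD c [])).flatMap (fun lst => if i < (lst.length : Int) then [PySem.List.pyGetD lst i ""] else []))).take (max 0 md).toNat).foldl (fun sm k => sm.insert k (d.getD k [])) PySem.Dict.empty).items
    rw [pv_order_eq]
    rw [show (max 0 md).toNat = (md - 0).toNat by omega]
    rfl

-- ===== VERDICT (by name: the statement is the Claim_ definition above) =====
theorem get_survey_sample_spec : Claim_equal_get_survey_sample := by
  intro all_detections max_display _ _
  unfold Spec_get_survey_sample
  exact pv_ports_eq all_detections max_display
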